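-- pv_equiv track=rewrite | github.com/pypi-data/pypi-mirror-401 | packages/qcombo/qcombo-0.1.4-py3-none-any.whl/qcombo/canonical.py | _internalAndRepeatedIdx
-- ===== SOURCE A (Python) =====
-- def _internalAndRepeatedIdx(flatIdx,externalIdx=[]):
--     res=[]
--     idxdict={}#initial a dict
--     for i in flatIdx:
--         idxdict[i]=0
--     for i in flatIdx:
--         if i not in externalIdx:
--             idxdict[i]+=1
--             if(idxdict[i]==2):
--                 res.append(i)
--     return res
-- ===== SOURCE B (Python) =====
-- def _internalAndRepeatedIdx(flatIdx, externalIdx=[]):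
--     positions = {}
--     for j, x in enumerate(flatIdx):
--         if x not in externalIdx:
--             positions.setdefault(x, []).append(j)
--     pairs = [(ps[1], x) for x, ps in positions.items() if len(ps) >= 2]
--     pairs.sort(key=lambda t: t[0])
--     return [x for _, x in pairs]
-- ===== Notes on version B (the rewrite author's own statement) =====
-- stated objective: alternative
-- what changed: Replaces A's running-count single pass with a staged algorithm: one enumerate pass builds a value-to-positions index, then values with at least two positions are selected and ordered by sorting on their second-occurrence position.
import Mathlib
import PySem

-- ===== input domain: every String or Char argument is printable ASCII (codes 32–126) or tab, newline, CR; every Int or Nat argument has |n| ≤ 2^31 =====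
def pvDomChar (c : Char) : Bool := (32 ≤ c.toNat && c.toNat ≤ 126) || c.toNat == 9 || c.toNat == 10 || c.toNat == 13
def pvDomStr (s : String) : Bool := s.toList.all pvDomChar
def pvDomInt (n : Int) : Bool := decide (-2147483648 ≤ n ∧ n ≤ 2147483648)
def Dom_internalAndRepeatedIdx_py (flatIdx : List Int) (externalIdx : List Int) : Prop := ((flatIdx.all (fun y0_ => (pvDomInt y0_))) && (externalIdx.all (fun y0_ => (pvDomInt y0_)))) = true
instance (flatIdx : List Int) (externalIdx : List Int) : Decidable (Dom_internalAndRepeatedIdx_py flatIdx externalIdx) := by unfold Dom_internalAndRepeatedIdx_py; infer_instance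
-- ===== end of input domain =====

-- B replaces A's running-count single pass by a staged algorithm: one enumerate pass builds a
-- value → positions index, then values with ≥ 2 positions are emitted sorted by their
-- second-occurrence position (objective: alternative).

-- ===== PORT A =====
def internalAndRepeatedIdx_py (flatIdx : List Int) (externalIdx : List Int) : List Int :=
  -- res=[]; idxdict={}; for i in flatIdx: idxdict[i]=0
  let idxdict : PySem.Dict Int Int := flatIdx.foldl (fun d i => d.insert i 0) PySem.Dict.empty
  -- for i in flatIdx: if i not in externalIdx: idxdict[i]+=1; if idxdict[i]==2: res.append(i)
  -- (idxdict[i] read via getD 0: the key is always present after the first loop, so the default is never used)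
  (flatIdx.foldl
    (fun (s : List Int × PySem.Dict Int Int) i =>
      if externalIdx.contains i then s
      else
        let d := s.2.insert i (s.2.getD i 0 + 1)
        if d.getD i 0 == 2 then (s.1 ++ [i], d) else (s.1, d))
    ([], idxdict)).1

-- ===== PORT B =====
def internalAndRepeatedIdx_py_alt (flatIdx : List Int) (externalIdx : List Int) : List Int :=
  -- positions = {}; for j, x in enumerate(flatIdx): if x not in externalIdx: positions.setdefault(x, []).append(j)
  -- pairs = [(ps[1], x) for x, ps in positions.items() if len(ps) >= 2]
  -- pairs.sort(key=lambda t: t[0]); return [x for _, x in pairs]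
  (PySem.List.sorted
    ((((PySem.List.enumerate flatIdx).foldl
        (fun d p => if externalIdx.contains p.2 then d else d.modify p.2 [] (· ++ [p.1]))
        PySem.Dict.empty).items.filter (fun q => decide (2 ≤ q.2.length))).map
          (fun q => (PySem.List.pyGetD q.2 1 0, q.1)))
    (·.1) false).map (·.2)

-- ===== PRECONDITION & SPEC =====
def Spec_internalAndRepeatedIdx_py (flatIdx : List Int) (externalIdx : List Int) (out : List Int) : Prop := out = internalAndRepeatedIdx_py_alt flatIdx externalIdx
instance (flatIdx : List Int) (externalIdx : List Int) (out : List Int) : Decidable (Spec_internalAndRepeatedIdx_py flatIdx externalIdx out) := by unfold Spec_internalAndRepeatedIdx_py; infer_instance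

-- ===== CLAIM (what is proved, stated in full; the proofs are below) =====
def Claim_equal_internalAndRepeatedIdx_py : Prop := ∀ (flatIdx : List Int) (externalIdx : List Int), Dom_internalAndRepeatedIdx_py flatIdx externalIdx → Spec_internalAndRepeatedIdx_py flatIdx externalIdx (internalAndRepeatedIdx_py flatIdx externalIdx)

-- ===== LEMMAS AND PROOFS =====

-- canonical specification: emit x when it is non-external and occurred exactly once in the prefix
def pvSpecRec (ext : List Int) : List Int → List Int → List Int
  | _, [] => []
  | pref, x :: xs =>
    (if ext.contains x = false ∧ pref.count x = 1 then [x] else []) ++ pvSpecRec ext (pref ++ [x]) xs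

-- ---------- A-side ----------

-- the initial dict (every key set to 0) reads 0 everywhere
theorem initDict_getD (l : List Int) :
    ∀ (d : PySem.Dict Int Int), (∀ i, d.getD i 0 = 0) →
      ∀ j, (l.foldl (fun d i => d.insert i 0) d).getD j 0 = 0 := by
  induction l with
  | nil => intro d hd j; exact hd j
  | cons x xs ih =>
    intro d hd j
    simp only [List.foldl_cons]
    refine ih _ ?_ j
    intro i
    rw [PySem.Dict.getD_insert]
    split_ifs with h
    · rfl
    · exact hd i

-- the A-side loop invariant: the dict holds, for every non-external value, its count in the prefix
theorem loopA_eq (ext : List Int) :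
    ∀ (xs pref res : List Int) (d : PySem.Dict Int Int),
      (∀ i, ext.contains i = false → d.getD i 0 = (pref.count i : Int)) →
      (xs.foldl
        (fun (s : List Int × PySem.Dict Int Int) i =>
          if ext.contains i then s
          else
            let d := s.2.insert i (s.2.getD i 0 + 1)
            if d.getD i 0 == 2 then (s.1 ++ [i], d) else (s.1, d))
        (res, d)).1 = res ++ pvSpecRec ext pref xs := by
  intro xs
  induction xs with
  | nil => intro pref res d _; simp [pvSpecRec]
  | cons x xs ih =>
    intro pref res d hd
    simp only [List.foldl_cons]
    by_cases hx : ext.contains x = true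
    · rw [if_pos hx]
      have hcond : ¬ (ext.contains x = false ∧ pref.count x = 1) := by
        intro ⟨h1, _⟩; rw [hx] at h1; exact absurd h1 (by simp)
      have hinv : ∀ i, ext.contains i = false → d.getD i 0 = ((pref ++ [x]).count i : Int) := by
        intro i hi
        have hne : x ≠ i := by intro h; rw [h] at hx; rw [hi] at hx; exact absurd hx (by simp)
        rw [List.count_append, List.count_singleton]
        simp [hne, hd i hi]
      rw [ih (pref ++ [x]) res d hinv, pvSpecRec, if_neg hcond, List.nil_append]
    · rw [if_neg hx]
      have hxf : ext.contains x = false := by simpa using hx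
      have hgx : d.getD x 0 = (pref.count x : Int) := hd x hxf
      have hnew : (d.insert x (d.getD x 0 + 1)).getD x 0 = (pref.count x : Int) + 1 := by
        rw [PySem.Dict.getD_insert_self, hgx]
      have hinv : ∀ i, ext.contains i = false →
          (d.insert x (d.getD x 0 + 1)).getD i 0 = ((pref ++ [x]).count i : Int) := by
        intro i hi
        rw [PySem.Dict.getD_insert, List.count_append, List.count_singleton]
        by_cases h : i = x
        · subst h
          simp only [beq_self_eq_true, if_true, hgx]
          push_cast
          ring
        · have hb : (x == i) = false := beq_eq_false_iff_ne.mpr (fun hh => h hh.symm)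
          rw [if_neg h, hb]
          simp [hd i hi]
      by_cases h2 : ((d.insert x (d.getD x 0 + 1)).getD x 0 == (2 : Int)) = true
      · rw [if_pos h2]
        have hcnt : pref.count x = 1 := by
          rw [hnew] at h2
          simp only [beq_iff_eq] at h2
          omega
        have hcond : ext.contains x = false ∧ pref.count x = 1 := ⟨hxf, hcnt⟩
        rw [ih (pref ++ [x]) (res ++ [x]) _ hinv, pvSpecRec, if_pos hcond,
          List.singleton_append, List.append_assoc, List.singleton_append]
      · rw [if_neg h2]
        have hcnt : pref.count x ≠ 1 := by
          intro hc
          rw [hnew, hc] at h2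
          simp at h2
        have hcond : ¬ (ext.contains x = false ∧ pref.count x = 1) := by
          intro ⟨_, h⟩; exact hcnt h
        rw [ih (pref ++ [x]) res _ hinv, pvSpecRec, if_neg hcond, List.nil_append]

theorem A_eq_specRec (flatIdx externalIdx : List Int) :
    internalAndRepeatedIdx_py flatIdx externalIdx = pvSpecRec externalIdx [] flatIdx := by
  unfold internalAndRepeatedIdx_py
  have h0 : ∀ j, ((flatIdx.foldl (fun d i => d.insert i 0) PySem.Dict.empty : PySem.Dict Int Int)).getD j 0 = 0 :=
    initDict_getD flatIdx PySem.Dict.empty (by intro i; simp [pysem])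
  have := loopA_eq externalIdx flatIdx [] []
    (flatIdx.foldl (fun d i => d.insert i 0) PySem.Dict.empty)
    (by intro i _; simp [h0 i])
  simpa using this

-- ---------- B-side ----------

-- positions of value v in the (index, value) list F
def pvIdxs (F : List (Int × Int)) (v : Int) : List Int :=
  (F.filter (fun p => p.2 == v)).map (·.1)

-- the unsorted pair list B builds: (second position of k, k) for repeated keys, in key order
def pvQ (F : List (Int × Int)) : List (Int × Int) :=
  ((PySem.Set.ofList (F.map (·.2))).filter (fun k => decide (2 ≤ (pvIdxs F k).length))).map
    (fun k => (PySem.List.pyGetD (pvIdxs F k) 1 0, k))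

-- the second-occurrence entries of F, in F's order
def pvCF (seen : List (Int × Int)) : List (Int × Int) → List (Int × Int)
  | [] => []
  | p :: rest =>
    (if seen.countP (fun q => q.2 == p.2) = 1 then [p] else []) ++ pvCF (seen ++ [p]) rest

theorem pvCF_append (p : Int × Int) :
    ∀ (F seen : List (Int × Int)),
      pvCF seen (F ++ [p]) =
        pvCF seen F ++ (if (seen ++ F).countP (fun q => q.2 == p.2) = 1 then [p] else []) := by
  intro F
  induction F with
  | nil => intro seen; simp [pvCF]
  | cons x xs ih =>
    intro seen
    simp only [List.cons_append, pvCF, ih (seen ++ [x]), List.append_assoc]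
    simp

theorem pvCF_sublist : ∀ (F seen : List (Int × Int)), (pvCF seen F).Sublist F := by
  intro F
  induction F with
  | nil => intro seen; simp [pvCF]
  | cons x xs ih =>
    intro seen
    simp only [pvCF]
    split_ifs with h
    · simpa using (ih (seen ++ [x])).cons₂ x
    · simpa using (ih (seen ++ [x])).cons x

-- pvCF over the filtered enumerate projects to the canonical spec
theorem pvCF_spec (ext : List Int) :
    ∀ (xs : List Int) (n : Int) (seen : List (Int × Int)) (pref : List Int),
      (∀ v, ext.contains v = false → seen.countP (fun q => q.2 == v) = pref.count v) →
      ((pvCF seen ((PySem.List.enumerate xs n).filter (fun p => !ext.contains p.2))).map (·.2))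
        = pvSpecRec ext pref xs := by
  intro xs
  induction xs with
  | nil => intro n seen pref _; simp [pvCF, pvSpecRec, PySem.List.enumerate_nil]
  | cons x xs ih =>
    intro n seen pref hinv
    rw [PySem.List.enumerate_cons]
    simp only [List.filter_cons]
    by_cases hx : ext.contains x = true
    · rw [if_neg (by simp [List.mem_of_elem_eq_true hx])]
      have hcond : ¬ (ext.contains x = false ∧ pref.count x = 1) := by
        intro ⟨h1, _⟩; rw [hx] at h1; exact absurd h1 (by simp)
      rw [pvSpecRec, if_neg hcond, List.nil_append]
      refine ih (n + 1) seen (pref ++ [x]) ?_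
      intro v hv
      have hne : x ≠ v := by intro h; rw [h] at hx; rw [hv] at hx; exact absurd hx (by simp)
      rw [List.count_append, List.count_singleton]
      simp [hne, hinv v hv]
    · have hxf : ext.contains x = false := by simpa using hx
      have hmem : x ∉ ext := by simpa using hxf
      rw [if_pos (by simp [hmem])]
      rw [pvSpecRec]
      have htail :
          ((pvCF (seen ++ [(n, x)]) ((PySem.List.enumerate xs (n + 1)).filter (fun p => !ext.contains p.2))).map (·.2))
            = pvSpecRec ext (pref ++ [x]) xs := by
        refine ih (n + 1) (seen ++ [(n, x)]) (pref ++ [x]) ?_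
        intro v hv
        rw [List.countP_append, List.count_append, List.count_singleton, hinv v hv]
        by_cases h : x = v <;> simp [h]
      simp only [pvCF, hinv x hxf, List.map_append, htail]
      by_cases hc : pref.count x = 1
      · rw [if_pos hc, if_pos ⟨hxf, hc⟩]; simp
      · rw [if_neg hc, if_neg (by intro ⟨_, h⟩; exact hc h)]; simp

theorem pvIdxs_append (F : List (Int × Int)) (p : Int × Int) (v : Int) :
    pvIdxs (F ++ [p]) v = pvIdxs F v ++ (if p.2 == v then [p.1] else []) := by
  simp only [pvIdxs, List.filter_append]
  by_cases h : (p.2 == v) = true <;> simp [h]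

theorem pvIdxs_length (F : List (Int × Int)) (v : Int) :
    (pvIdxs F v).length = F.countP (fun q => q.2 == v) := by
  simp [pvIdxs, ← List.countP_eq_length_filter]

-- a flag flipped to true at one member a moves a to the end of the filter, up to permutation
theorem filter_flag_perm :
    ∀ (l : List Int) (a : Int), l.Nodup → a ∈ l →
      ∀ (q q' : Int → Bool), q' a = false → q a = true → (∀ k, k ≠ a → q k = q' k) →
        (l.filter q).Perm (l.filter q' ++ [a]) := by
  intro l
  induction l with
  | nil => intro a _ ha; simp at ha
  | cons x xs ih =>
    intro a hnd ha q q' hq'a hqa hagree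
    rcases List.nodup_cons.mp hnd with ⟨hxnot, hndxs⟩
    by_cases hxa : x = a
    · subst hxa
      have hfeq : xs.filter q = xs.filter q' := by
        apply List.filter_congr
        intro k hk
        exact hagree k (fun h => hxnot (h ▸ hk))
      simp only [List.filter_cons, hqa, hq'a, if_true, if_false, Bool.false_eq_true]
      rw [hfeq]
      exact (List.perm_append_singleton x (xs.filter q')).symm
    · have haxs : a ∈ xs := by 
        rcases List.mem_cons.mp ha with h | h
        · exact absurd h.symm hxa
        · exact h
      have hqx : q x = q' x := hagree x hxa
      simp only [List.filter_cons, hqx]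
      by_cases hc : q' x = true
      · simp only [hc, if_true]
        exact (ih a hndxs haxs q q' hq'a hqa hagree).cons x
      · have : q' x = false := by simpa using hc
        simp only [this]
        simpa using ih a hndxs haxs q q' hq'a hqa hagree

theorem pyGetD_one_append (xs ys : List Int) (h : 2 ≤ xs.length) :
    PySem.List.pyGetD (xs ++ ys) 1 0 = PySem.List.pyGetD xs 1 0 := by
  rw [show (1 : Int) = ((1 : Nat) : Int) from rfl, PySem.List.pyGetD_natCast,
    PySem.List.pyGetD_natCast]
  match xs, h with
  | a :: b :: xs, _ => simp


theorem pyGetD_one_snd (xs : List Int) (y : Int) (h : xs.length = 1) :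
    PySem.List.pyGetD (xs ++ [y]) 1 0 = y := by
  match xs, h with
  | [a], _ => rfl


theorem pvQ_append (F : List (Int × Int)) (p : Int × Int) :
    (pvQ (F ++ [p])).Perm
      (pvQ F ++ (if F.countP (fun q => q.2 == p.2) = 1 then [p] else [])) := by
  have hmapsnd : (F ++ [p]).map (·.2) = F.map (·.2) ++ [p.2] := by simp
  have hK : PySem.Set.ofList ((F ++ [p]).map (·.2))
      = PySem.Set.add (PySem.Set.ofList (F.map (·.2))) p.2 := by
    rw [hmapsnd, PySem.Set.ofList_append_singleton]
  set K := PySem.Set.ofList (F.map (·.2)) with hKdef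
  have hndK : K.Nodup := PySem.Set.nodup_ofList _
  have hIdx_ne : ∀ v, v ≠ p.2 → pvIdxs (F ++ [p]) v = pvIdxs F v := by
    intro v hv
    rw [pvIdxs_append]
    have : (p.2 == v) = false := beq_eq_false_iff_ne.mpr (fun h => hv h.symm)
    simp [this]
  have hIdxp : pvIdxs (F ++ [p]) p.2 = pvIdxs F p.2 ++ [p.1] := by
    rw [pvIdxs_append]; simp
  have hlenp : (pvIdxs (F ++ [p]) p.2).length = (pvIdxs F p.2).length + 1 := by
    rw [hIdxp]; simp
  have hmemK : p.2 ∈ K ↔ (pvIdxs F p.2).length ≠ 0 := by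
    rw [hKdef, PySem.Set.mem_ofList, List.mem_map]
    simp only [pvIdxs, List.length_map]
    constructor
    · rintro ⟨q, hq, hq2⟩ hlen0
      rw [List.length_eq_zero_iff, List.filter_eq_nil_iff] at hlen0
      exact hlen0 q hq (by simp [hq2])
    · intro h0
      have hne : F.filter (fun q => q.2 == p.2) ≠ [] := by
        intro h; rw [h] at h0; simp at h0
      rcases List.exists_mem_of_ne_nil _ hne with ⟨q, hq⟩
      rcases List.mem_filter.mp hq with ⟨hqF, hq2⟩
      exact ⟨q, hqF, by simpa using hq2⟩
  by_cases hc0 : (pvIdxs F p.2).length = 0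
  · -- new key with a single position: pvQ unchanged
    have hnot : p.2 ∉ K := fun h => (hmemK.mp h) hc0
    have heq : pvQ (F ++ [p]) = pvQ F := by
      unfold pvQ
      rw [hK, PySem.Set.add_of_not_mem hnot, List.filter_append]
      have hl1 : (pvIdxs (F ++ [p]) p.2).length = 1 := by omega
      have h1 : [p.2].filter (fun k => decide (2 ≤ (pvIdxs (F ++ [p]) k).length)) = [] := by
        simp [hl1]
      have h2 : K.filter (fun k => decide (2 ≤ (pvIdxs (F ++ [p]) k).length))
          = K.filter (fun k => decide (2 ≤ (pvIdxs F k).length)) := by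
        apply List.filter_congr
        intro k hk
        simp only [hIdx_ne k (fun h => hnot (h ▸ hk))]
      rw [h1, h2, List.append_nil]
      apply List.map_congr_left
      intro k hk
      have hkK : k ∈ K := List.mem_of_mem_filter hk
      simp only [hIdx_ne k (fun h => hnot (h ▸ hkK))]
    rw [heq, if_neg (by rw [← pvIdxs_length]; omega)]
    simp
  · by_cases hc1 : (pvIdxs F p.2).length = 1
    · -- second occurrence: p joins the pair list
      have hmem : p.2 ∈ K := hmemK.mpr (by omega)
      have hperm := filter_flag_perm K p.2 hndK hmem
        (fun k => decide (2 ≤ (pvIdxs (F ++ [p]) k).length))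
        (fun k => decide (2 ≤ (pvIdxs F k).length))
        (by simp only [hc1]; simp)
        (by simp only [hlenp, hc1]; simp)
        (by intro k hk; simp only [hIdx_ne k hk])
      unfold pvQ
      rw [hK, PySem.Set.add_of_mem hmem, if_pos (by rw [← pvIdxs_length, hc1])]
      refine (hperm.map _).trans ?_
      rw [List.map_append]
      apply List.Perm.of_eq
      congr 1
      · apply List.map_congr_left
        intro k hk
        have hq' : decide (2 ≤ (pvIdxs F k).length) = true := (List.mem_filter.mp hk).2
        have hkne : k ≠ p.2 := by
          intro h; subst h; rw [hc1] at hq'; simp at hq'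
        simp only [hIdx_ne k hkne]
      · simp only [List.map_cons, List.map_nil, hIdxp]
        rw [pyGetD_one_snd _ _ hc1]
    · -- already repeated: the recorded second position is unchanged
      have hmem : p.2 ∈ K := hmemK.mpr (by omega)
      have hlen2 : 2 ≤ (pvIdxs F p.2).length := by omega
      have heq : pvQ (F ++ [p]) = pvQ F := by
        unfold pvQ
        rw [hK, PySem.Set.add_of_mem hmem]
        have h2 : K.filter (fun k => decide (2 ≤ (pvIdxs (F ++ [p]) k).length))
            = K.filter (fun k => decide (2 ≤ (pvIdxs F k).length)) := by
          apply List.filter_congr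
          intro k hk
          by_cases hkp : k = p.2
          · subst hkp
            simp only [hlenp, decide_eq_decide]
            omega
          · simp only [hIdx_ne k hkp]
        rw [h2]
        apply List.map_congr_left
        intro k hk
        by_cases hkp : k = p.2
        · subst hkp
          simp only [hIdxp, pyGetD_one_append _ _ hlen2]
        · simp only [hIdx_ne k hkp]
      rw [heq, if_neg (by rw [← pvIdxs_length]; omega)]
      simp

theorem pvQ_perm_pvCF (F : List (Int × Int)) : (pvQ F).Perm (pvCF [] F) := by
  induction F using List.reverseRecOn with
  | nil => simp [pvQ, pvCF, PySem.Set.ofList]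
  | append_singleton F p ih =>
    refine (pvQ_append F p).trans ?_
    rw [pvCF_append]
    simp only [List.nil_append]
    exact ih.append_right _

-- B's pair list is pvQ of the filtered enumerate
theorem port_pairs_eq (flatIdx externalIdx : List Int) :
    ((((PySem.List.enumerate flatIdx).foldl
        (fun d p => if externalIdx.contains p.2 then d else d.modify p.2 [] (· ++ [p.1]))
        PySem.Dict.empty).items.filter (fun q => decide (2 ≤ q.2.length))).map
          (fun q => (PySem.List.pyGetD q.2 1 0, q.1)))
      = pvQ ((PySem.List.enumerate flatIdx).filter (fun p => !externalIdx.contains p.2)) := by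
  set F := (PySem.List.enumerate flatIdx).filter (fun p => !externalIdx.contains p.2) with hF
  -- the skip-if loop over the enumerate is the loop over the filtered enumerate
  have hfold : (PySem.List.enumerate flatIdx).foldl
        (fun d p => if externalIdx.contains p.2 then d else d.modify p.2 [] (· ++ [p.1]))
        (PySem.Dict.empty : PySem.Dict Int (List Int))
      = F.foldl (fun d p => d.modify p.2 [] (· ++ [p.1])) PySem.Dict.empty := by
    rw [hF, List.foldl_filter]
    congr 1
    funext d p
    by_cases h : externalIdx.contains p.2 = true
    · rw [h]; rfl
    · simp only [Bool.not_eq_true] at h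
      rw [h]; rfl
  rw [hfold]
  set d := F.foldl (fun d p => d.modify p.2 [] (· ++ [p.1]))
    (PySem.Dict.empty : PySem.Dict Int (List Int)) with hd
  have hkeys : d.keys = PySem.Set.ofList (F.map (·.2)) := by
    rw [hd, PySem.Dict.keys_foldl_modify_key]
    simp [PySem.Set.update_nil_left]
  have hnodup : d.keys.Nodup := by
    rw [hkeys]; exact PySem.Set.nodup_ofList _
  have hgetD : ∀ v, d.getD v [] = pvIdxs F v := by
    intro v
    have hswap : d = (F.map (fun p => (p.2, p.1))).foldl
        (fun d q => d.modify q.1 [] (· ++ [q.2])) PySem.Dict.empty := by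
      rw [hd, List.foldl_map]
    rw [hswap, PySem.Dict.getD_foldl_modify_append]
    simp only [PySem.Dict.getD_empty, List.nil_append, List.filter_map, pvIdxs,
      Function.comp_def]
    simp
  have hitems : d.items = d.keys.map (fun k => (k, pvIdxs F k)) := by
    rw [PySem.Dict.items_eq_map_keys d hnodup []]
    apply List.map_congr_left
    intro k _
    rw [hgetD]
  rw [hitems, hkeys, List.filter_map, List.map_map]
  unfold pvQ
  simp [Function.comp_def]
theorem B_eq_specRec (flatIdx externalIdx : List Int) :
    internalAndRepeatedIdx_py_alt flatIdx externalIdx = pvSpecRec externalIdx [] flatIdx := by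
  unfold internalAndRepeatedIdx_py_alt
  rw [port_pairs_eq]
  set F := (PySem.List.enumerate flatIdx).filter (fun p => !externalIdx.contains p.2) with hF
  have hpwF : F.Pairwise (fun a b => a.1 < b.1) :=
    (PySem.List.pairwise_lt_enumerate (xs := flatIdx) (s := 0)).filter _
  have hpw : (pvCF [] F).Pairwise (fun a b => a.1 < b.1) :=
    hpwF.sublist (pvCF_sublist F [])
  have hs : PySem.List.sorted (pvQ F) (·.1) false = pvCF [] F :=
    PySem.List.sorted_eq_of_perm_of_pairwise_lt _ _ _ (pvQ_perm_pvCF F).symm hpw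
  rw [hs]
  exact pvCF_spec externalIdx flatIdx 0 [] [] (by intro v _; simp)

-- ===== VERDICT (by name: the statement is the Claim_ definition above) =====
theorem internalAndRepeatedIdx_py_spec : Claim_equal_internalAndRepeatedIdx_py := by
  intro flatIdx externalIdx _
  show internalAndRepeatedIdx_py flatIdx externalIdx = internalAndRepeatedIdx_py_alt flatIdx externalIdx
  rw [A_eq_specRec, B_eq_specRec]
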